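-- pv_equiv track=rewrite | github.com/AlgorithmStudy-PDA-4th/algo-challenges | week01/이현주/의상.py | solution
-- ===== SOURCE A (Python) =====
-- def solution(clothes):
--     answer = 1
--     clothes_dict = {}
--     for cloth in clothes:
--         clothes_dict[cloth[1]] = clothes_dict.get(cloth[1], 1) + 1
--
--     for v in clothes_dict.values():
--         answer *= v
--
--     return answer - 1
-- ===== SOURCE B (Python) =====
-- def solution(clothes):
--     cats = sorted(c[1] for c in clothes)
--     answer = 1
--     run = 0
--     prev = None
--     for c in cats:
--         if c == prev:
--             run += 1
--         else:
--             answer *= run + 1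
--             run = 1
--             prev = c
--     return answer * (run + 1) - 1
-- ===== Notes on version B (the rewrite author's own statement) =====
-- stated objective: alternative
-- what changed: Replaces A's hash-count dictionary with a sort of the category list followed by a single run-length scan (sorted groupby), multiplying (run length + 1) per run of equal categories.
import Mathlib
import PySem

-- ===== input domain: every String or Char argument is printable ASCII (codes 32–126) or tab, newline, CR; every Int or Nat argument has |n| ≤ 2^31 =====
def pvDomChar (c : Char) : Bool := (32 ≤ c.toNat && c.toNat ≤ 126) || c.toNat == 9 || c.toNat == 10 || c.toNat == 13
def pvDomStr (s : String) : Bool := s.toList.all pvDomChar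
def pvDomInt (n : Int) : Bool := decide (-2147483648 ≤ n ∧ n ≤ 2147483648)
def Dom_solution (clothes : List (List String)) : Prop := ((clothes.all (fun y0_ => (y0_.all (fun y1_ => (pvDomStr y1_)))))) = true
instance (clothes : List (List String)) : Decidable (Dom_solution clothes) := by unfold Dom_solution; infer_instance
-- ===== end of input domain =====

-- B replaces A's hash-count dictionary with sort + a single run-length scan over equal categories (alternative algorithm, not claimed faster).


-- ===== PORT A =====
def solution (clothes : List (List String)) : Int :=
  let clothes_dict : PySem.Dict String Int :=
    clothes.foldl (fun d cloth =>
      d.insert (PySem.List.pyGetD cloth 1 "") (d.getD (PySem.List.pyGetD cloth 1 "") 1 + 1))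
      PySem.Dict.empty
  let answer : Int := clothes_dict.values.foldl (fun a v => a * v) 1
  answer - 1

-- ===== PORT B =====
def solution_alt (clothes : List (List String)) : Int :=
  let cats := PySem.List.sorted (clothes.map (fun c => PySem.List.pyGetD c 1 "")) (fun x => x) false
  let st := cats.foldl (fun (st : Int × Int × Option String) c =>
      if some c = st.2.2 then (st.1, st.2.1 + 1, st.2.2)
      else (st.1 * (st.2.1 + 1), 1, some c)) (1, 0, none)
  st.1 * (st.2.1 + 1) - 1

-- ===== PRECONDITION & SPEC =====
-- Pre_ excludes exactly the inputs where some cloth has fewer than 2 entries: there cloth[1] raises IndexError in both A and B.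
def Pre_solution (clothes : List (List String)) : Prop := ∀ cloth ∈ clothes, 2 ≤ cloth.length
instance (clothes : List (List String)) : Decidable (Pre_solution clothes) := by unfold Pre_solution; infer_instance
def pvWitness_solution : List (List String) :=
  [["yellow_hat", "headgear"], ["blue_sunglasses", "eyewear"], ["green_turban", "headgear"]]
def Spec_solution (clothes : List (List String)) (out : Int) : Prop := out = solution_alt clothes
instance (clothes : List (List String)) (out : Int) : Decidable (Spec_solution clothes out) := by unfold Spec_solution; infer_instance

-- ===== CLAIM (what is proved, stated in full; the proofs are below) =====
def Claim_equal_solution : Prop := ∀ (clothes : List (List String)), Dom_solution clothes → Pre_solution clothes → Spec_solution clothes (solution clothes)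

-- ===== LEMMAS AND PROOFS =====

-- A's dictionary fold, on the extracted category list.
def foldA (xs : List String) : PySem.Dict String Int :=
  xs.foldl (fun d x => d.insert x (d.getD x 1 + 1)) PySem.Dict.empty

-- B's run-length step and final value.
def stepB (st : Int × Int × Option String) (c : String) : Int × Int × Option String :=
  if some c = st.2.2 then (st.1, st.2.1 + 1, st.2.2) else (st.1 * (st.2.1 + 1), 1, some c)

def finalB (st : Int × Int × Option String) : Int := st.1 * (st.2.1 + 1)

-- The common value: product over the distinct categories of (count + 1).
def prodP (xs : List String) : Int :=
  ((PySem.Set.ofList xs).map (fun k => (xs.count k : Int) + 1)).prod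

-- prodP restricted away from the previous category c.
def prodG (t : List String) (c : String) : Int :=
  (((PySem.Set.ofList t).filter (fun k => k ≠ c)).map (fun k => (t.count k : Int) + 1)).prod

theorem get?_mapmk (ks : List String) (f : String → Int) (x : String) :
    (PySem.Dict.mk (ks.map (fun k => (k, f k)))).get? x = if x ∈ ks then some (f x) else none := by
  induction ks with
  | nil => simp [PySem.Dict.get?]
  | cons k ks ih =>
    simp only [List.map_cons, PySem.Dict.get?_mk_cons, ih]
    by_cases hk : k = x
    · subst hk; simp
    · simp [hk, Ne.symm hk]

theorem contains_mapmk (ks : List String) (f : String → Int) (x : String) :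
    (PySem.Dict.mk (ks.map (fun k => (k, f k)))).contains x = decide (x ∈ ks) := by
  induction ks with
  | nil => simp [PySem.Dict.contains]
  | cons k ks ih =>
    simp only [PySem.Dict.contains, List.map_cons, List.any_cons] at *
    by_cases hk : k = x
    · subst hk; simp
    · simp [hk, Ne.symm hk, ih]

theorem itemsA (xs : List String) :
    (foldA xs).items = (PySem.Set.ofList xs).map (fun k => (k, (xs.count k : Int) + 1)) := by
  induction xs using List.reverseRecOn with
  | nil => simp [foldA, PySem.Dict.empty, PySem.Set.ofList]
  | append_singleton xs x ih =>
    have hd : foldA xs = PySem.Dict.mk ((PySem.Set.ofList xs).map (fun k => (k, (xs.count k : Int) + 1))) :=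
      PySem.Dict.ext ih
    have hstep : foldA (xs ++ [x]) = (foldA xs).insert x ((foldA xs).getD x 1 + 1) := by
      simp [foldA, List.foldl_append]
    rw [hstep, hd, PySem.Set.ofList_append_singleton]
    by_cases hx : x ∈ xs
    · have hset : (PySem.Set.ofList xs).add x = PySem.Set.ofList xs := by
        simp [PySem.Set.add, PySem.Set.mem_ofList, hx]
      rw [hset]
      have hget : (PySem.Dict.mk ((PySem.Set.ofList xs).map (fun k => (k, (xs.count k : Int) + 1)))).getD x 1
          = (xs.count x : Int) + 1 := by
        simp [PySem.Dict.getD, get?_mapmk, PySem.Set.mem_ofList, hx]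
      rw [PySem.Dict.insert, hget]
      simp only [contains_mapmk, PySem.Set.mem_ofList, hx, decide_true, if_true]
      simp only [List.map_map]
      refine List.map_congr_left ?_
      intro k hk
      by_cases hkx : k = x
      · subst hkx
        simp [List.count_append]
      · simp [Function.comp, hkx, List.count_append, Ne.symm hkx, List.count_nil]
    · have hset : (PySem.Set.ofList xs).add x = PySem.Set.ofList xs ++ [x] := by
        simp [PySem.Set.add, PySem.Set.mem_ofList, hx]
      rw [hset]
      have hget : (PySem.Dict.mk ((PySem.Set.ofList xs).map (fun k => (k, (xs.count k : Int) + 1)))).getD x 1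
          = 1 := by
        simp [PySem.Dict.getD, get?_mapmk, PySem.Set.mem_ofList, hx]
      rw [PySem.Dict.insert, hget]
      simp only [contains_mapmk, PySem.Set.mem_ofList, hx, decide_false, Bool.false_eq_true,
        if_false]
      rw [List.map_append]
      congr 1
      · refine List.map_congr_left ?_
        intro k hk
        have hkx : k ≠ x := fun h => hx (h ▸ (PySem.Set.mem_ofList xs k).mp hk)
        simp [List.count_append, List.count_nil, Ne.symm hkx]
      · simp [List.count_append, List.count_eq_zero_of_not_mem hx]

theorem factorP (y : String) (t : List String) :
    prodP (y :: t) = (((y :: t).count y : Int) + 1) * prodG t y := by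
  rw [prodP, PySem.Set.ofList_cons, List.map_cons, List.prod_cons, prodG]
  congr 1
  have hf : (PySem.Set.ofList t).discard y = (PySem.Set.ofList t).filter (fun k => k ≠ y) := by
    refine List.filter_congr ?_
    intro a _
    by_cases h : a = y <;> simp [h]
  rw [hf]
  refine congrArg List.prod (List.map_congr_left ?_)
  intro k hk
  have hky : k ≠ y := by
    have := List.of_mem_filter hk
    simpa using this
  simp [Ne.symm hky]

theorem prodG_cons_self (c : String) (t : List String) : prodG (c :: t) c = prodG t c := by
  rw [prodG, prodG, PySem.Set.ofList_cons]
  rw [List.filter_cons_of_neg (by simp)]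
  have hf : ((PySem.Set.ofList t).discard c).filter (fun k => k ≠ c)
      = (PySem.Set.ofList t).filter (fun k => k ≠ c) := by
    rw [show (PySem.Set.ofList t).discard c
        = (PySem.Set.ofList t).filter (fun z => !(z == c)) from rfl]
    rw [List.filter_filter]
    refine List.filter_congr ?_
    intro a _
    by_cases h : a = c <;> simp [h]
  rw [hf]
  refine congrArg List.prod (List.map_congr_left ?_)
  intro k hk
  have hkc : k ≠ c := by
    have := List.of_mem_filter hk
    simpa using this
  simp [Ne.symm hkc]

theorem prodG_of_not_mem (c : String) (ys : List String) (h : c ∉ ys) : prodG ys c = prodP ys := by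
  rw [prodG, prodP]
  have : (PySem.Set.ofList ys).filter (fun k => k ≠ c) = PySem.Set.ofList ys := by
    refine List.filter_eq_self.mpr ?_
    intro a ha
    have ham : a ∈ ys := (PySem.Set.mem_ofList ys a).mp ha
    simp only [ne_eq, decide_eq_true_eq]
    exact fun he => h (he ▸ ham)
  rw [this]

theorem prodP_perm (xs ys : List String) (h : xs.Perm ys) : prodP xs = prodP ys := by
  have hof : (PySem.Set.ofList xs : List String).Perm (PySem.Set.ofList ys) := by
    refine (List.perm_ext_iff_of_nodup (PySem.Set.nodup_ofList xs) (PySem.Set.nodup_ofList ys)).mpr ?_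
    intro a
    simp [PySem.Set.mem_ofList, h.mem_iff]
  calc ((PySem.Set.ofList xs).map (fun k => (xs.count k : Int) + 1)).prod
      = ((PySem.Set.ofList xs).map (fun k => (ys.count k : Int) + 1)).prod := by
        refine congrArg List.prod (List.map_congr_left ?_)
        intro k _
        rw [h.count_eq]
    _ = ((PySem.Set.ofList ys).map (fun k => (ys.count k : Int) + 1)).prod :=
        (hof.map _).prod_eq

theorem invB (ys : List String) (hs : ys.Pairwise (· ≤ ·)) :
    ∀ (a r : Int) (c : String), (∀ y ∈ ys, c ≤ y) →
    finalB (ys.foldl stepB (a, r, some c)) = a * (r + (ys.count c : Int) + 1) * prodG ys c := by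
  induction ys with
  | nil =>
    intro a r c _
    simp [finalB, prodG, PySem.Set.ofList]
  | cons y t ih =>
    intro a r c hc
    rw [List.pairwise_cons] at hs
    rw [List.foldl_cons]
    by_cases hyc : y = c
    · subst hyc
      rw [show stepB (a, r, some y) y = (a, r + 1, some y) from by simp [stepB]]
      rw [ih hs.2 a (r + 1) y (fun z hz => hs.1 z hz)]
      rw [prodG_cons_self, List.count_cons_self]
      push_cast
      ring
    · rw [show stepB (a, r, some c) y = (a * (r + 1), 1, some y) from by
        simp [stepB, hyc]]
      rw [ih hs.2 (a * (r + 1)) 1 y (fun z hz => hs.1 z hz)]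
      have hcm : c ∉ y :: t := by
        intro hm
        rcases List.mem_cons.mp hm with h | h
        · exact hyc h.symm
        · exact hyc (le_antisymm (hs.1 c h) (hc y (by simp)))
      rw [prodG_of_not_mem c (y :: t) hcm, factorP,
        List.count_eq_zero_of_not_mem hcm, List.count_cons_self]
      push_cast
      ring

theorem foldB_sorted (ys : List String) (hs : ys.Pairwise (· ≤ ·)) :
    finalB (ys.foldl stepB (1, 0, none)) = prodP ys := by
  cases ys with
  | nil => simp [finalB, prodP, PySem.Set.ofList]
  | cons y t =>
    rw [List.pairwise_cons] at hs
    rw [List.foldl_cons]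
    rw [show stepB (1, 0, none) y = (1 * (0 + 1), 1, some y) from by simp [stepB]]
    rw [invB t hs.2 (1 * (0 + 1)) 1 y (fun z hz => hs.1 z hz)]
    rw [factorP, List.count_cons_self]
    push_cast
    ring

theorem solutionA_eq (clothes : List (List String)) :
    solution clothes = prodP (clothes.map (fun c => PySem.List.pyGetD c 1 "")) - 1 := by
  have hfold : clothes.foldl (fun d cloth =>
      d.insert (PySem.List.pyGetD cloth 1 "") (d.getD (PySem.List.pyGetD cloth 1 "") 1 + 1))
      PySem.Dict.empty = foldA (clothes.map (fun c => PySem.List.pyGetD c 1 "")) := by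
    rw [foldA, List.foldl_map]
  rw [solution]
  simp only [hfold]
  congr 1
  rw [show (foldA (clothes.map (fun c => PySem.List.pyGetD c 1 ""))).values
      = (foldA (clothes.map (fun c => PySem.List.pyGetD c 1 ""))).items.map (fun p => p.2) from rfl]
  rw [itemsA, List.map_map, prodP]
  rw [← List.prod_eq_foldl]
  rfl

theorem solutionB_eq (clothes : List (List String)) :
    solution_alt clothes = prodP (clothes.map (fun c => PySem.List.pyGetD c 1 "")) - 1 := by
  rw [solution_alt]
  have hstep : (fun (st : Int × Int × Option String) c =>
      if some c = st.2.2 then (st.1, st.2.1 + 1, st.2.2)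
      else (st.1 * (st.2.1 + 1), 1, some c)) = stepB := rfl
  simp only [hstep]
  have hsorted := PySem.List.sorted_pairwise
    (clothes.map (fun c => PySem.List.pyGetD c 1 "")) (fun x => x)
  have := foldB_sorted
    (PySem.List.sorted (clothes.map (fun c => PySem.List.pyGetD c 1 "")) (fun x => x) false)
    (by simpa using hsorted)
  rw [show ∀ st : Int × Int × Option String, st.1 * (st.2.1 + 1) - 1 = finalB st - 1 from fun _ => rfl]
  rw [this]
  rw [prodP_perm _ _ (PySem.List.sorted_perm (clothes.map (fun c => PySem.List.pyGetD c 1 "")) (fun x => x) false)]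

-- ===== VERDICT (by name: the statement is the Claim_ definition above) =====
theorem solution_spec : Claim_equal_solution := by
  intro clothes _ _
  show solution clothes = solution_alt clothes
  rw [solutionA_eq, solutionB_eq]
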